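-- pv_equiv track=rewrite | github.com/jianheACM/CATChem | cmake/generate_metstate_macros.py | classify_fields
-- ===== SOURCE A (Python) =====
-- def classify_fields(fields):
--     """
--     Classify MetState fields by type and suitability for VirtualMet.
--
--     Parameters
--     ----------
--     fields : list of tuple
--         List of (name, type_name, rank, dims, is_edge) for each field.
--
--     Returns
--     -------
--     tuple of lists
--         (atmospheric_3d, categorical_3d, surface_2d, scalar_0d)
--         where each list contains field names suitable for VirtualMet
--     """
--     # Categorical 3D fields with non-vertical dimensions (soil, land use, etc.)
--     categorical_patterns = {
--         'SOILM', 'SOILT', 'FRSOIL',           # Soil-related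
--         'FRLANDUSE', 'FRLAI', 'FRZ0',         # Land use categories
--     }
--
--     atmospheric_3d = []
--     categorical_3d = []
--     surface_2d = []
--     scalar_0d = []
--
--     for name, type_name, rank, dims, is_edge in fields:
--         name_upper = name.upper()
--
--         if rank == 3:
--             # Check if this is a categorical field
--             if name_upper in categorical_patterns:
--                 categorical_3d.append(name)
--             else:
--                 # Assume all other 3D fields are atmospheric vertical profiles
--                 atmospheric_3d.append(name)
--         elif rank == 2:
--             # All 2D fields are surface fields
--             surface_2d.append(name)
--         elif rank == 0:
--             # All scalar fields
--             scalar_0d.append(name)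
--
--     return atmospheric_3d, categorical_3d, surface_2d, scalar_0d
-- ===== SOURCE B (Python) =====
-- def classify_fields(fields):
--     """Same classification via four independent filtering passes (one predicate each)."""
--     categorical_patterns = {
--         'SOILM', 'SOILT', 'FRSOIL',
--         'FRLANDUSE', 'FRLAI', 'FRZ0',
--     }
--     atmospheric_3d = [name for name, _t, rank, _d, _e in fields
--                       if rank == 3 and name.upper() not in categorical_patterns]
--     categorical_3d = [name for name, _t, rank, _d, _e in fields
--                       if rank == 3 and name.upper() in categorical_patterns]
--     surface_2d = [name for name, _t, rank, _d, _e in fields if rank == 2]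
--     scalar_0d = [name for name, _t, rank, _d, _e in fields if rank == 0]
--     return atmospheric_3d, categorical_3d, surface_2d, scalar_0d
-- ===== Notes on version B (the rewrite author's own statement) =====
-- stated objective: alternative
-- what changed: Replaces the single branching accumulation loop with four independent filtering passes over fields, one predicate per output list.
import Mathlib
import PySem

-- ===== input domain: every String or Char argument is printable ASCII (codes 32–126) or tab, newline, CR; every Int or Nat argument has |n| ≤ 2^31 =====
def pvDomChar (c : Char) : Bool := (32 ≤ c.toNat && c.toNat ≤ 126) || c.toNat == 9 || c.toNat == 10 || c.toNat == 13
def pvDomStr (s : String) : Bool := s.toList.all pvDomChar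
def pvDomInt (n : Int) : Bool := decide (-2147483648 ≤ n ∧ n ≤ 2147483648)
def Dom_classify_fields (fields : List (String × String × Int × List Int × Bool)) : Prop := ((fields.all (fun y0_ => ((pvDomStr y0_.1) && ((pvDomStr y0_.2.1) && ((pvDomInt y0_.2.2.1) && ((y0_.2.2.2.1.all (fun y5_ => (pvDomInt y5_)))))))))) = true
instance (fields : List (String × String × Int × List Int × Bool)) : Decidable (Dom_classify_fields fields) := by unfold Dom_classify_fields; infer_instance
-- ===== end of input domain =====

-- B replaces A's single branching accumulation loop by four independent filtering passes (alternative decomposition, same cost).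


-- ===== PORT A =====
-- the set literal categorical_patterns (distinct string literals)
def catPatterns : List String := ["SOILM", "SOILT", "FRSOIL", "FRLANDUSE", "FRLAI", "FRZ0"]

-- one iteration of A's for-loop, updating the four accumulator lists
def classifyStep (acc : List String × List String × List String × List String)
    (f : String × String × Int × List Int × Bool) :
    List String × List String × List String × List String :=
  let name := f.1
  let rank := f.2.2.1
  let name_upper := PySem.Str.upper name
  if rank = 3 then
    if catPatterns.contains name_upper then
      (acc.1, acc.2.1 ++ [name], acc.2.2.1, acc.2.2.2)
    else
      (acc.1 ++ [name], acc.2.1, acc.2.2.1, acc.2.2.2)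
  else if rank = 2 then
    (acc.1, acc.2.1, acc.2.2.1 ++ [name], acc.2.2.2)
  else if rank = 0 then
    (acc.1, acc.2.1, acc.2.2.1, acc.2.2.2 ++ [name])
  else
    acc

def classify_fields (fields : List (String × String × Int × List Int × Bool)) : List String × List String × List String × List String :=
  fields.foldl classifyStep ([], [], [], [])

-- ===== PORT B =====
def classify_fields_alt (fields : List (String × String × Int × List Int × Bool)) : List String × List String × List String × List String :=
  let atmospheric_3d := fields.filterMap (fun f =>
    if f.2.2.1 = 3 ∧ ¬ catPatterns.contains (PySem.Str.upper f.1) then some f.1 else none)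
  let categorical_3d := fields.filterMap (fun f =>
    if f.2.2.1 = 3 ∧ catPatterns.contains (PySem.Str.upper f.1) then some f.1 else none)
  let surface_2d := fields.filterMap (fun f => if f.2.2.1 = 2 then some f.1 else none)
  let scalar_0d := fields.filterMap (fun f => if f.2.2.1 = 0 then some f.1 else none)
  (atmospheric_3d, categorical_3d, surface_2d, scalar_0d)

-- ===== PRECONDITION & SPEC =====
def Spec_classify_fields (fields : List (String × String × Int × List Int × Bool)) (out : List String × List String × List String × List String) : Prop := out = classify_fields_alt fields
instance (fields : List (String × String × Int × List Int × Bool)) (out : List String × List String × List String × List String) : Decidable (Spec_classify_fields fields out) := by unfold Spec_classify_fields; infer_instance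

-- ===== CLAIM (what is proved, stated in full; the proofs are below) =====
def Claim_equal_classify_fields : Prop := ∀ (fields : List (String × String × Int × List Int × Bool)), Dom_classify_fields fields → Spec_classify_fields fields (classify_fields fields)

-- ===== LEMMAS AND PROOFS =====
theorem classify_foldl_acc (fields : List (String × String × Int × List Int × Bool))
    (a c s z : List String) :
    fields.foldl classifyStep (a, c, s, z) =
      (a ++ fields.filterMap (fun f =>
        if f.2.2.1 = 3 ∧ ¬ catPatterns.contains (PySem.Str.upper f.1) then some f.1 else none),
       c ++ fields.filterMap (fun f =>
        if f.2.2.1 = 3 ∧ catPatterns.contains (PySem.Str.upper f.1) then some f.1 else none),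
       s ++ fields.filterMap (fun f => if f.2.2.1 = 2 then some f.1 else none),
       z ++ fields.filterMap (fun f => if f.2.2.1 = 0 then some f.1 else none)) := by
  induction fields generalizing a c s z with
  | nil => simp
  | cons f fs ih =>
    simp only [List.foldl_cons, List.filterMap_cons]
    by_cases h3 : f.2.2.1 = 3
    · by_cases hc : PySem.Str.upper f.1 ∈ catPatterns
      · simp [classifyStep, h3, hc, ih]
      · simp [classifyStep, h3, hc, ih]
    · by_cases h2 : f.2.2.1 = 2
      · simp [classifyStep, h2, ih]
      · by_cases h0 : f.2.2.1 = 0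
        · simp [classifyStep, h0, ih]
        · simp [classifyStep, h3, h2, h0, ih]

-- ===== VERDICT (by name: the statement is the Claim_ definition above) =====
theorem classify_fields_spec : Claim_equal_classify_fields := by
  intro fields _
  show classify_fields fields = classify_fields_alt fields
  simp [classify_fields, classify_fields_alt, classify_foldl_acc]
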